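-- pv_equiv track=rewrite | github.com/azmeuk/webdav-filepicker | picker/app.py | build_breadcrumb
-- ===== SOURCE A (Python) =====
-- def build_breadcrumb(path: str) -> list[dict]:
--     parts = path.strip("/").split("/") if path.strip("/") else []
--     crumbs = [{"name": "🏠", "path": "/"}]
--     accumulated = "/"
--     for part in parts:
--         accumulated += part + "/"
--         crumbs.append({"name": part, "path": accumulated})
--     return crumbs
-- ===== SOURCE B (Python) =====
-- def build_breadcrumb(path: str) -> list[dict]:
--     parts = path.strip("/").split("/") if path.strip("/") else []
--     crumbs = [{"name": "🏠", "path": "/"}]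
--     for i, part in enumerate(parts):
--         crumbs.append({"name": part, "path": "/" + "/".join(parts[:i + 1]) + "/"})
--     return crumbs
-- ===== Notes on version B (the rewrite author's own statement) =====
-- stated objective: alternative
-- what changed: Replaces the running mutable accumulator string with slice-based prefix reconstruction: each crumb's path is recomputed by slash-joining the slice parts[:i+1] via enumerate, so no accumulated state is threaded through the loop.
import Mathlib
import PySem

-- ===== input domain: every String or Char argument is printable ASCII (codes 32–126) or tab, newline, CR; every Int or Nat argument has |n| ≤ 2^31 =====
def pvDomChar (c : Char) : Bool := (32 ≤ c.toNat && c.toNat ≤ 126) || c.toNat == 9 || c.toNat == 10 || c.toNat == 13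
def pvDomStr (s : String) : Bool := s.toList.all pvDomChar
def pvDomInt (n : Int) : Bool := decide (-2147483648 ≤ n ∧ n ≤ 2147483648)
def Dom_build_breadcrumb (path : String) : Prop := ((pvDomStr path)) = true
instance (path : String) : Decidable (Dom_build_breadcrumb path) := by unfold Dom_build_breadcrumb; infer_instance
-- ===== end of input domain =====

-- B rebuilds each crumb's path by slash-joining the slice parts[:i+1]
-- via enumerate instead of threading a mutable accumulated string through the loop (alternative decomposition).


-- ===== PORT A =====
def build_breadcrumb (path : String) : List (List (String × String)) :=
  let stripped := PySem.Str.stripChars path "/"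
  let parts : List String :=
    if stripped ≠ "" then (PySem.Chars.splitOn stripped.toList "/".toList).map String.ofList
    else []
  let fin := parts.foldl
    (fun (st : String × List (List (String × String))) part =>
      let accumulated := st.1 ++ part ++ "/"
      (accumulated, st.2 ++ [[("name", part), ("path", accumulated)]]))
    ("/", [[("name", "🏠"), ("path", "/")]])
  fin.2

-- ===== PORT B =====
def build_breadcrumb_alt (path : String) : List (List (String × String)) :=
  let stripped := PySem.Str.stripChars path "/"
  let parts : List String :=
    if stripped ≠ "" then (PySem.Chars.splitOn stripped.toList "/".toList).map String.ofList
    else []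
  [("name", "🏠"), ("path", "/")] ::
    (PySem.List.enumerate parts).map (fun ip =>
      [("name", ip.2),
       ("path", "/" ++ PySem.Str.join "/" (PySem.List.slice parts none (some (ip.1 + 1))) ++ "/")])

-- ===== PRECONDITION & SPEC =====
def Spec_build_breadcrumb (path : String) (out : List (List (String × String))) : Prop := out = build_breadcrumb_alt path
instance (path : String) (out : List (List (String × String))) : Decidable (Spec_build_breadcrumb path out) := by unfold Spec_build_breadcrumb; infer_instance

-- ===== CLAIM (what is proved, stated in full; the proofs are below) =====
def Claim_equal_build_breadcrumb : Prop := ∀ (path : String), Dom_build_breadcrumb path → Spec_build_breadcrumb path (build_breadcrumb path)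

-- ===== LEMMAS AND PROOFS =====

-- step function of A's loop
def pvStep (st : String × List (List (String × String))) (part : String) :
    String × List (List (String × String)) :=
  let accumulated := st.1 ++ part ++ "/"
  (accumulated, st.2 ++ [[("name", part), ("path", accumulated)]])

def pvAcc (acc : String) (l : List String) : String := l.foldl (fun a p => a ++ p ++ "/") acc

lemma pvAcc_cons (acc p : String) (ps : List String) :
    pvAcc acc (p :: ps) = pvAcc (acc ++ p ++ "/") ps := rfl

-- A's fold, characterised elementwise
lemma pvA_fold (parts : List String) (acc : String) (cs : List (List (String × String))) :
    (parts.foldl pvStep (acc, cs)).2 =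
      cs ++ (List.range parts.length).map
        (fun k => [("name", parts.getD k ""), ("path", pvAcc acc (parts.take (k+1)))]) := by
  induction parts generalizing acc cs with
  | nil => simp
  | cons p ps ih =>
    have h1 : List.range (ps.length + 1) = 0 :: (List.range ps.length).map Nat.succ :=
      List.range_succ_eq_map
    simp only [List.foldl_cons, List.length_cons, h1, List.map_cons, List.map_map]
    rw [show pvStep (acc, cs) p =
        (acc ++ p ++ "/", cs ++ [[("name", p), ("path", acc ++ p ++ "/")]]) from rfl]
    rw [ih]
    simp [pvAcc, Function.comp, List.append_assoc]

lemma pv_pyRange_range (n : Nat) :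
    PySem.List.pyRange 0 (n : Int) 1 = (List.range n).map Int.ofNat := by
  induction n with
  | zero => simp [PySem.List.pyRange]
  | succ m ih =>
    rw [show ((m + 1 : Nat) : Int) = (m : Int) + 1 by push_cast; ring]
    rw [PySem.List.pyRange_one_append 0 (m : Int) ((m : Int) + 1) (by positivity) (by omega)]
    rw [PySem.List.pyRange_one_cons (by omega : (m : Int) < (m : Int) + 1)]
    rw [ih]
    have : PySem.List.pyRange ((m : Int) + 1) ((m : Int) + 1) 1 = [] := by
      simp [PySem.List.pyRange]
    simp [this, List.range_succ]

-- "/" ++ "/".join(l) ++ "/" is the accumulator over l, for nonempty l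
lemma pv_join_slash (l : List String) (h : l ≠ []) (a : String) :
    a ++ PySem.Str.join "/" l ++ "/" = pvAcc a l := by
  induction l generalizing a with
  | nil => exact absurd rfl h
  | cons p ps ih =>
    cases ps with
    | nil =>
      simp [PySem.Str.join, PySem.Chars.join_singleton, pvAcc]
    | cons q rest =>
      have hj : PySem.Str.join "/" (p :: q :: rest) = p ++ "/" ++ PySem.Str.join "/" (q :: rest) := by
        simp only [PySem.Str.join, List.map_cons,
          PySem.Chars.join_cons_cons "/".toList p.toList q.toList (rest.map String.toList)]
        rw [String.ofList_append, String.ofList_append, String.ofList_toList]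
        rfl
      rw [pvAcc_cons, ← ih (by simp) (a ++ p ++ "/"), hj]
      simp [String.append_assoc]

-- B's tail, characterised elementwise
lemma pvB_map (parts : List String) :
    (PySem.List.enumerate parts).map (fun ip =>
        [("name", ip.2),
         ("path", "/" ++ PySem.Str.join "/" (PySem.List.slice parts none (some (ip.1 + 1))) ++ "/")]) =
      (List.range parts.length).map
        (fun k => [("name", parts.getD k ""), ("path", pvAcc "/" (parts.take (k+1)))]) := by
  rw [PySem.List.enumerate_eq_map_pyRange parts ""]
  rw [show PySem.List.len parts = (parts.length : Int) from rfl]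
  rw [pv_pyRange_range, List.map_map, List.map_map]
  apply List.map_congr_left
  intro k hk
  have hk' : k < parts.length := List.mem_range.mp hk
  simp only [Function.comp]
  rw [show (Int.ofNat k) = ((k : Nat) : Int) from rfl]
  rw [PySem.List.pyGetD_natCast]
  rw [show ((k : Int) + 1) = ((k + 1 : Nat) : Int) by push_cast; ring]
  rw [PySem.List.slice_to_natCast]
  rw [pv_join_slash (parts.take (k+1)) (by
      intro hnil
      rcases List.take_eq_nil_iff.mp hnil with h | h
      · omega
      · rw [h] at hk'; simp at hk') "/"]

-- ===== VERDICT (by name: the statement is the Claim_ definition above) =====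
theorem build_breadcrumb_spec : Claim_equal_build_breadcrumb := by
  intro path _
  unfold Spec_build_breadcrumb build_breadcrumb build_breadcrumb_alt
  simp only
  rw [pvB_map]
  rw [show (fun (st : String × List (List (String × String))) part =>
      let accumulated := st.1 ++ part ++ "/"
      (accumulated, st.2 ++ [[("name", part), ("path", accumulated)]])) = pvStep from rfl]
  rw [pvA_fold]
  simp
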